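-- pv_equiv track=rewrite | github.com/DaniilOlshanskyi/simplified-pdf-parser | app_easyocr_simplified.py | extract_alternating_key_values
-- ===== SOURCE A (Python) =====
-- def extract_alternating_key_values(text: str) -> dict[str, str]:
--     """Extract key-value pairs by treating non-empty lines as alternating keys and values."""
--     lines = text.split('\n')
--     results = {}
--     non_empty_lines = [line.strip() for line in lines if line.strip()]
--
--     # Process pairs of lines (key, value)
--     for i in range(0, len(non_empty_lines) - 1, 2):
--         key = non_empty_lines[i]
--         value = non_empty_lines[i + 1] if i + 1 < len(non_empty_lines) else ""
--
--         if key and value:  # Only add if both key and value exist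
--             results[key] = value
--
--     return results
-- ===== SOURCE B (Python) =====
-- def extract_alternating_key_values(text: str) -> dict[str, str]:
--     """Single pass over the raw lines with a nullable pending key (no index arithmetic)."""
--     results = {}
--     pending = None
--     for line in text.split('\n'):
--         s = line.strip()
--         if not s:
--             continue
--         if pending is None:
--             pending = s
--         else:
--             results[pending] = s
--             pending = None
--     return results
-- ===== Notes on version B (the rewrite author's own statement) =====
-- stated objective: simpler
-- what changed: Replaces A's materialised filtered list plus a stride-2 index loop with bounds checks by a single pass over the raw lines keeping a nullable pending key.
import Mathlib
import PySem

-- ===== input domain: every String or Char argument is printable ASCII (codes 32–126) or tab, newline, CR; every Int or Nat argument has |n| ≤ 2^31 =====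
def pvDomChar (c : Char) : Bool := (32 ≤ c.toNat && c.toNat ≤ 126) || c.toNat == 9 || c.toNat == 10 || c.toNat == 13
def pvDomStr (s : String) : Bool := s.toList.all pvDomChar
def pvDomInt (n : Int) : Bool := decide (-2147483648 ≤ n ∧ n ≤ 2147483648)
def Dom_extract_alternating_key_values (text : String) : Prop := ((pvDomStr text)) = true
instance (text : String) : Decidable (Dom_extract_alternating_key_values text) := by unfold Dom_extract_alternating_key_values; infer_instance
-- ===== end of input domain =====

-- B replaces A's filtered list + stride-2 index loop by one pass with a nullable pending key (simpler; same cost).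

-- ===== PORT A =====
def extract_alternating_key_values (text : String) : List (String × String) :=
  -- lines = text.split('\n')   (sep "\n" ≠ "", so split? is always some)
  let lines := (PySem.Str.split? text "\n").getD []
  -- non_empty_lines = [line.strip() for line in lines if line.strip()]
  let non_empty_lines :=
    (lines.filter (fun line => !(PySem.Str.strip line == ""))).map PySem.Str.strip
  -- for i in range(0, len(non_empty_lines) - 1, 2): …
  let results :=
    (PySem.List.pyRange 0 ((non_empty_lines.length : Int) - 1) 2).foldl
      (fun (results : PySem.Dict String String) i =>
        -- index i comes from range(0, len-1, 2), always in bounds, so pyGetD is exact here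
        let key := PySem.List.pyGetD non_empty_lines i ""
        let value :=
          if i + 1 < (non_empty_lines.length : Int) then
            PySem.List.pyGetD non_empty_lines (i + 1) ""
          else ""
        if key ≠ "" ∧ value ≠ "" then results.insert key value else results)
      PySem.Dict.empty
  results.items

-- ===== PORT B =====
def extract_alternating_key_values_alt (text : String) : List (String × String) :=
  let st :=
    ((PySem.Str.split? text "\n").getD []).foldl
      (fun (st : PySem.Dict String String × Option String) line =>
        let s := PySem.Str.strip line
        if s == "" then st
        else
          match st.2 with
          | none => (st.1, some s)
          | some k => (st.1.insert k s, none))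
      (PySem.Dict.empty, none)
  st.1.items

-- ===== PRECONDITION & SPEC =====
def Spec_extract_alternating_key_values (text : String) (out : List (String × String)) : Prop := out = extract_alternating_key_values_alt text
instance (text : String) (out : List (String × String)) : Decidable (Spec_extract_alternating_key_values text out) := by unfold Spec_extract_alternating_key_values; infer_instance

-- ===== CLAIM (what is proved, stated in full; the proofs are below) =====
def Claim_equal_extract_alternating_key_values : Prop := ∀ (text : String), Dom_extract_alternating_key_values text → Spec_extract_alternating_key_values text (extract_alternating_key_values text)

-- ===== LEMMAS AND PROOFS =====

/-- The key/value pairs read off a list of (stripped, non-empty) lines. -/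
def pvPairs : List String → List (String × String)
  | [] => []
  | [_] => []
  | k :: v :: rest => (k, v) :: pvPairs rest

/-- A's stride-2 index loop equals a fold of dict-inserts over `pvPairs l`,
    for lists whose elements are all non-empty. -/
theorem pvLoopA_eq (l : List String) (h : ∀ s ∈ l, s ≠ "") (d : PySem.Dict String String) :
    (PySem.List.pyRange 0 ((l.length : Int) - 1) 2).foldl
      (fun (results : PySem.Dict String String) i =>
        let key := PySem.List.pyGetD l i ""
        let value :=
          if i + 1 < (l.length : Int) then PySem.List.pyGetD l (i + 1) "" else ""
        if key ≠ "" ∧ value ≠ "" then results.insert key value else results) d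
    = (pvPairs l).foldl (fun d kv => d.insert kv.1 kv.2) d := by
  induction l using pvPairs.induct generalizing d with
  | case1 => simp [PySem.List.pyRange, pvPairs]
  | case2 x => simp [PySem.List.pyRange, pvPairs]
  | case3 k v rest ih =>
    have hL : (((k :: v :: rest).length : Int)) - 1 = (rest.length : Int) + 1 := by
      push_cast [List.length_cons]; ring
    have hshift : PySem.List.pyRange 0 ((rest.length : Int) + 1) 2
        = 0 :: (PySem.List.pyRange 0 ((rest.length : Int) - 1) 2).map (· + 2) := by
      rw [PySem.List.pyRange_of_pos 0 ((rest.length : Int) + 1) (by norm_num),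
          PySem.List.pyRange_of_pos 0 ((rest.length : Int) - 1) (by norm_num)]
      have hn : (0:Int) ≤ (rest.length : Int) := Int.natCast_nonneg _
      have hcount : (if (0:Int) < (rest.length : Int) + 1
            then (((rest.length : Int) + 1 - 0 + 2 - 1) / 2).toNat else 0)
          = (if (0:Int) < (rest.length : Int) - 1
            then (((rest.length : Int) - 1 - 0 + 2 - 1) / 2).toNat else 0) + 1 := by
        split_ifs <;> omega
      rw [hcount, List.range_succ_eq_map]
      simp only [List.map_cons, List.map_map]
      refine congrArg₂ _ (by norm_num) ?_
      refine List.map_congr_left ?_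
      intro x _
      simp only [Function.comp_apply]
      push_cast
      ring
    have hlen : (((k :: v :: rest).length : Int)) = (rest.length : Int) + 2 := by
      push_cast [List.length_cons]; ring
    rw [hL, hshift]
    simp only [List.foldl_cons, List.foldl_map]
    have hstep : ∀ (acc : PySem.Dict String String),
        ∀ i ∈ PySem.List.pyRange 0 ((rest.length : Int) - 1) 2,
        (fun (results : PySem.Dict String String) i =>
          let key := PySem.List.pyGetD (k :: v :: rest) (i + 2) "";
          let value := if i + 2 + 1 < (((k :: v :: rest).length : Int))
            then PySem.List.pyGetD (k :: v :: rest) (i + 2 + 1) "" else "";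
          if key ≠ "" ∧ value ≠ "" then results.insert key value else results) acc i
        = (fun (results : PySem.Dict String String) i =>
          let key := PySem.List.pyGetD rest i "";
          let value := if i + 1 < ((rest.length : Int))
            then PySem.List.pyGetD rest (i + 1) "" else "";
          if key ≠ "" ∧ value ≠ "" then results.insert key value else results) acc i := by
      intro acc i hi
      have h0 : 0 ≤ i := ((PySem.List.mem_pyRange_iff_of_pos (by norm_num) i).1 hi).1
      have hg1 : PySem.List.pyGetD (k :: v :: rest) (i + 2) "" = PySem.List.pyGetD rest i "" := by
        rw [PySem.List.pyGetD_of_nonneg _ _ (by omega), PySem.List.pyGetD_of_nonneg _ _ h0]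
        have ht : (i + 2).toNat = i.toNat + 2 := by omega
        simp [ht, List.getD]
      have hg2 : PySem.List.pyGetD (k :: v :: rest) (i + 2 + 1) ""
          = PySem.List.pyGetD rest (i + 1) "" := by
        rw [PySem.List.pyGetD_of_nonneg _ _ (by omega), PySem.List.pyGetD_of_nonneg _ _ (by omega)]
        have ht : (i + 2 + 1).toNat = (i + 1).toNat + 2 := by omega
        simp [ht, List.getD]
      have hiff : (i + 2 + 1 < (((k :: v :: rest).length : Int)))
          ↔ (i + 1 < ((rest.length : Int))) := by
        rw [hlen]; omega
      simp only [hg1, hg2, hiff]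
    rw [PySem.List.foldl_congr_mem _ _ _ _ hstep]
    have hk : k ≠ "" := h k (by simp)
    have hv : v ≠ "" := h v (by simp)
    have hlt : ((0:Int) + 1 < (((k :: v :: rest).length : Int))) := by rw [hlen]; omega
    rw [if_pos]
    · simp only [pvPairs, List.foldl_cons]
      have hinit : PySem.List.pyGetD (k :: v :: rest) 0 ""
          = k := by simp [PySem.List.pyGetD_ofNat']
      have hinit1 : PySem.List.pyGetD (k :: v :: rest) (0 + 1) ""
          = v := by norm_num [PySem.List.pyGetD_ofNat']
      rw [hinit, if_pos hlt, hinit1]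
      exact ih (fun s hs => h s (by simp [hs])) (d.insert k v)
    · constructor
      · simpa [PySem.List.pyGetD_ofNat'] using hk
      · rw [if_pos hlt]
        simpa [PySem.List.pyGetD_ofNat', show ((0:Int)+1) = 1 by norm_num] using hv

/-- B's raw-line fold equals the no-skip fold over the stripped, filtered lines. -/
theorem pvFoldB_filter (lines : List String) (st : PySem.Dict String String × Option String) :
    lines.foldl
      (fun (st : PySem.Dict String String × Option String) line =>
        let s := PySem.Str.strip line
        if s == "" then st
        else
          match st.2 with
          | none => (st.1, some s)
          | some k => (st.1.insert k s, none)) st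
    = ((lines.filter (fun line => !(PySem.Str.strip line == ""))).map PySem.Str.strip).foldl
        (fun (st : PySem.Dict String String × Option String) s =>
          match st.2 with
          | none => (st.1, some s)
          | some k => (st.1.insert k s, none)) st := by
  induction lines generalizing st with
  | nil => rfl
  | cons l rest ih =>
    by_cases hs : PySem.Str.strip l = ""
    · simpa [hs] using ih st
    · have := ih (match st.2 with
        | none => (st.1, some (PySem.Str.strip l))
        | some k => (st.1.insert k (PySem.Str.strip l), none))
      simpa [hs] using this

/-- The pending-key fold, started with no pending key, produces the dict of `pvPairs`. -/
theorem pvFoldB_pairs (l : List String) (d : PySem.Dict String String) :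
    (l.foldl
        (fun (st : PySem.Dict String String × Option String) s =>
          match st.2 with
          | none => (st.1, some s)
          | some k => (st.1.insert k s, none)) (d, none)).1
    = (pvPairs l).foldl (fun d kv => d.insert kv.1 kv.2) d := by
  induction l using pvPairs.induct generalizing d with
  | case1 => rfl
  | case2 x => rfl
  | case3 k v rest ih => simpa [pvPairs] using ih (d.insert k v)

theorem pvNel_ne (lines : List String) :
    ∀ s ∈ (lines.filter (fun line => !(PySem.Str.strip line == ""))).map PySem.Str.strip,
      s ≠ "" := by
  intro s hs
  rcases List.mem_map.1 hs with ⟨line, hline, rfl⟩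
  rcases List.mem_filter.1 hline with ⟨-, hne⟩
  simpa using hne

-- ===== VERDICT (by name: the statement is the Claim_ definition above) =====
theorem extract_alternating_key_values_spec : Claim_equal_extract_alternating_key_values := by
  intro text _
  simp only [Spec_extract_alternating_key_values, extract_alternating_key_values,
    extract_alternating_key_values_alt]
  rw [pvFoldB_filter, pvFoldB_pairs, pvLoopA_eq _ (pvNel_ne _)]
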